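-- pv_equiv track=rewrite | github.com/Melophrasis/muscript-development | 3_Stave-representation/ascii_visualiser.py | single_note
-- ===== SOURCE A (Python) =====
-- def note_to_index(note):
--
--     note_index = {
--         48 : 2,
--         49 : 4,
--         50 : 6,
--         51 : 8,
--         52 : 10,
--         53 : 14,
--         54 : 16,
--         55 : 18,
--         56 : 20,
--         57 : 22,
--         58 : 24,
--         59 : 26,
--         60 : 30,
--         61 : 32,
--         62 : 34,
--         63 : 36,
--         64 : 38,
--         65 : 42,
--         66 : 44,
--         67 : 46,
--         68 : 48,
--         69 : 50,
--         70 : 52,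
--         71 : 54,
--     }
--
--     return note_index[note]
--
-- def base_model():
--
--     return """
-- |  | | | |  |  | | | | | |  |  | | | |  |  | | | | | |  |
-- |  | | | |  |  | | | | | |  |  | | | |  |  | | | | | |  |
-- |  |_| |_|  |  |_| |_| |_|  |  |_| |_|  |  |_| |_| |_|  |
-- |   |   |   |   |   |   |   |   |   |   |   |   |   |   |
-- |   |   |   |   |   |   |   |   |   |   |   |   |   |   |
-- |___|___|___|___|___|___|___|___|___|___|___|___|___|___|
--   C   D   E   F   G   A   B   C   D   E   F   G   A   B
-- """.lstrip()
--
-- def single_note(note):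
--     base = base_model()
--         # Position of note on Diagram
--     n_index = note_to_index(note)
--         # Flag to stop at bottom of key-drawing
--     end_flag = False
--         # Newlines to separate from input / previous
--     new_model = '\n\n\n\n\n\n\n\n\n\n'
--
--     # This should be generalised to a drawing function:
--
--         # Break string into lists for modification
--     for raw_line in base.splitlines():
--         line_list = list(raw_line)
--
--         if line_list[n_index] == '_':
--             end_flag = True
--
--         elif end_flag == False:
--             # Draws active note
--             line_list[n_index] = 'x'
--
--             # Rebuild string
--         line_list.append('\n')
--         new_line = ''.join(line_list)
--
--         new_model += new_line
--
--     return(new_model)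
-- ===== SOURCE B (Python) =====
-- def note_to_index(note):
--     note_index = {
--         48: 2, 49: 4, 50: 6, 51: 8, 52: 10, 53: 14, 54: 16, 55: 18,
--         56: 20, 57: 22, 58: 24, 59: 26, 60: 30, 61: 32, 62: 34, 63: 36,
--         64: 38, 65: 42, 66: 44, 67: 46, 68: 48, 69: 50, 70: 52, 71: 54,
--     }
--     return note_index[note]
--
--
-- def base_model():
--     return """
-- |  | | | |  |  | | | | | |  |  | | | |  |  | | | | | |  |
-- |  | | | |  |  | | | | | |  |  | | | |  |  | | | | | |  |
-- |  |_| |_|  |  |_| |_| |_|  |  |_| |_|  |  |_| |_| |_|  |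
-- |   |   |   |   |   |   |   |   |   |   |   |   |   |   |
-- |   |   |   |   |   |   |   |   |   |   |   |   |   |   |
-- |___|___|___|___|___|___|___|___|___|___|___|___|___|___|
--   C   D   E   F   G   A   B   C   D   E   F   G   A   B
-- """.lstrip()
--
--
-- def single_note(note):
--     n_index = note_to_index(note)
--     lines = base_model().splitlines()
--     # first pass: stop row = first line with '_' in the note's column
--     stop = next((i for i, line in enumerate(lines) if line[n_index] == '_'),
--                 len(lines))
--     # second pass: mark rows strictly above the stop row
--     return '\n' * 10 + ''.join(
--         (line[:n_index] + 'x' + line[n_index + 1:] if i < stop else line) + '\n'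
--         for i, line in enumerate(lines))
-- ===== Notes on version B (the rewrite author's own statement) =====
-- stated objective: alternative
-- what changed: A's single loop carries a mutable end_flag and rewrites each line in place; B makes two passes: it first finds the stop row (first line with '_' in the note's column) and then rebuilds the drawing by slice-concatenation, marking only rows above that stop row.
import Mathlib
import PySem

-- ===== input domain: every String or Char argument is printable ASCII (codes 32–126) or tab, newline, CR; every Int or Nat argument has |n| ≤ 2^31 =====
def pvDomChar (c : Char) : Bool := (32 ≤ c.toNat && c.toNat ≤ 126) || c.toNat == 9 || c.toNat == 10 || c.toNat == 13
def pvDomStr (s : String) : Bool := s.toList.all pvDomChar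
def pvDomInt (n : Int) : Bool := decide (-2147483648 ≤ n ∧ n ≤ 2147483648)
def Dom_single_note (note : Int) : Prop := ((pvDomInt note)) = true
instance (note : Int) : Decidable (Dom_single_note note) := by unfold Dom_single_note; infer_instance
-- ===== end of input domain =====

set_option maxRecDepth 40000
set_option maxHeartbeats 1000000


-- B replaces A's single stateful loop (mutable end_flag, in-place list edit) by two passes:
-- find the stop row, then rebuild every line by slice-concatenation (objective: alternative).

-- ===== PORT A =====
-- the dict of note_to_index, in insertion order
def noteIndexDict : PySem.Dict Int Int := PySem.Dict.ofList
  [(48, 2), (49, 4), (50, 6), (51, 8), (52, 10), (53, 14), (54, 16), (55, 18),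
   (56, 20), (57, 22), (58, 24), (59, 26), (60, 30), (61, 32), (62, 34), (63, 36),
   (64, 38), (65, 42), (66, 44), (67, 46), (68, 48), (69, 50), (70, 52), (71, 54)]

-- base_model(): the literal with its leading '\n' removed by .lstrip()
def baseModel : String :=
  "|  | | | |  |  | | | | | |  |  | | | |  |  | | | | | |  |\n|  | | | |  |  | | | | | |  |  | | | |  |  | | | | | |  |\n|  |_| |_|  |  |_| |_| |_|  |  |_| |_|  |  |_| |_| |_|  |\n|   |   |   |   |   |   |   |   |   |   |   |   |   |   |\n|   |   |   |   |   |   |   |   |   |   |   |   |   |   |\n|___|___|___|___|___|___|___|___|___|___|___|___|___|___|\n  C   D   E   F   G   A   B   C   D   E   F   G   A   B  \n"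

-- the loop body of A's for-loop, as a helper (pyGetD/pySetD are exact here: the index from the
-- dict is ≤ 54 < 57 = length of every line, so the Python never raises IndexError)
def stepA (nIndex : Int) (st : Bool × String) (rawLine : String) : Bool × String :=
  let lineList := rawLine.toList
  if PySem.List.pyGetD lineList nIndex ' ' == '_' then
    (true, st.2 ++ String.ofList (lineList ++ ['\n']))
  else if st.1 == false then
    (st.1, st.2 ++ String.ofList (PySem.List.pySetD lineList nIndex 'x' ++ ['\n']))
  else
    (st.1, st.2 ++ String.ofList (lineList ++ ['\n']))

def single_note (note : Int) : String :=
  -- note_to_index: dict lookup; KeyError (none) is excluded by Pre_single_note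
  match PySem.Dict.get? noteIndexDict note with
  | none => ""
  | some nIndex =>
    ((PySem.Str.splitlines baseModel).foldl (stepA nIndex)
      (false, "\n\n\n\n\n\n\n\n\n\n")).2

-- ===== PORT B =====
def single_note_alt (note : Int) : String :=
  match PySem.Dict.get? noteIndexDict note with
  | none => ""
  | some nIndex =>
    let lines := PySem.Str.splitlines baseModel
    -- first pass: stop row = first line with '_' in the note's column (length of lines if none)
    let stop := lines.findIdx (fun l => PySem.List.pyGetD l.toList nIndex ' ' == '_')
    -- second pass: mark rows strictly above the stop row
    "\n\n\n\n\n\n\n\n\n\n" ++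
      PySem.Str.join "" ((PySem.List.enumerate lines).map (fun q =>
        (if q.1 < (stop : Int) then
            PySem.Str.slice q.2 none (some nIndex) ++ "x" ++
              PySem.Str.slice q.2 (some (nIndex + 1)) none
         else q.2) ++ "\n"))

-- ===== PRECONDITION & SPEC =====
-- Pre_ excludes exactly the notes outside note_to_index's dict, on which A raises KeyError
def Pre_single_note (note : Int) : Prop := 48 ≤ note ∧ note ≤ 71
instance (note : Int) : Decidable (Pre_single_note note) := by unfold Pre_single_note; infer_instance
def pvWitness_single_note : Int := (60)
def Spec_single_note (note : Int) (out : String) : Prop := out = single_note_alt note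
instance (note : Int) (out : String) : Decidable (Spec_single_note note out) := by unfold Spec_single_note; infer_instance

-- ===== CLAIM (what is proved, stated in full; the proofs are below) =====
def Claim_equal_single_note : Prop := ∀ (note : Int), Dom_single_note note → Pre_single_note note → Spec_single_note note (single_note note)

-- ===== LEMMAS AND PROOFS =====

-- the column predicate of both loops
def pcol (n : Int) (l : String) : Bool := PySem.List.pyGetD l.toList n ' ' == '_'

-- the common intermediate value: the drawing (after the ten newlines), as a char list
def gl (n : Int) : List String → List Char
  | [] => []
  | l :: rest =>
    if pcol n l then (l :: rest).flatMap (fun s => s.toList ++ ['\n'])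
    else (PySem.List.pySetD l.toList n 'x' ++ ['\n']) ++ gl n rest

theorem joinE (x : List Char) (xs : List (List Char)) :
    PySem.Chars.join [] (x :: xs) = x ++ PySem.Chars.join [] xs := by
  simp only [PySem.Chars.join, List.intercalate]
  induction xs with
  | nil => simp
  | cons y ys ih => simp_all [List.intersperse]

theorem joinUnch (lines : List String) :
    PySem.Chars.join [] ((lines.map (· ++ "\n")).map String.toList)
      = lines.flatMap (fun s => s.toList ++ ['\n']) := by
  induction lines with
  | nil => simp [PySem.Chars.join, List.intercalate]
  | cons l rest ih =>
    rw [List.map_cons, List.map_cons, joinE, List.flatMap_cons, ← ih]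
    simp [List.append_assoc]

theorem foldA_true (n : Int) (lines : List String) (acc : String) :
    lines.foldl (stepA n) (true, acc)
      = (true, acc ++ String.ofList (lines.flatMap (fun s => s.toList ++ ['\n']))) := by
  induction lines generalizing acc with
  | nil => simp
  | cons l rest ih =>
    rw [List.foldl_cons,
      show stepA n (true, acc) l = (true, acc ++ String.ofList (l.toList ++ ['\n'])) from by
        simp [stepA], ih]
    refine Prod.ext rfl ?_
    refine String.toList_inj.mp ?_
    simp [List.append_assoc]

theorem foldA_false (n : Int) (lines : List String) (acc : String) :
    ((lines.foldl (stepA n) (false, acc)).2).toList = acc.toList ++ gl n lines := by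
  induction lines generalizing acc with
  | nil => simp [gl]
  | cons l rest ih =>
    by_cases h : (PySem.List.pyGetD l.toList n ' ' == '_') = true
    · rw [List.foldl_cons,
        show stepA n (false, acc) l = (true, acc ++ String.ofList (l.toList ++ ['\n'])) from by
          simp [stepA, h], foldA_true]
      simp [gl, pcol, h, List.flatMap_cons, List.append_assoc]
    · rw [List.foldl_cons,
        show stepA n (false, acc) l
            = (false, acc ++ String.ofList (PySem.List.pySetD l.toList n 'x' ++ ['\n'])) from by
          simp [stepA, h], ih]
      simp [gl, pcol, h, List.append_assoc]

theorem enumShift (lines : List String) (f : String → String) (s S : Int) :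
    (PySem.List.enumerate lines s).map (fun q => (if q.1 < S then f q.2 else q.2) ++ "\n")
      = (PySem.List.enumerate lines 0).map (fun q => (if q.1 < S - s then f q.2 else q.2) ++ "\n") := by
  induction lines generalizing s S with
  | nil => simp [PySem.List.enumerate]
  | cons l rest ih =>
    rw [PySem.List.enumerate_cons, PySem.List.enumerate_cons, List.map_cons, List.map_cons,
      ih (s + 1) S, ih (0 + 1) (S - s), show S - (s + 1) = S - s - (0 + 1) from by ring]
    congr 1
    by_cases hc : s < S
    · rw [if_pos hc, if_pos (by omega : (0 : Int) < S - s)]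
    · rw [if_neg hc, if_neg (by omega : ¬ (0 : Int) < S - s)]

theorem enumNever (lines : List String) (f : String → String) (s S : Int) (h : S ≤ s) :
    (PySem.List.enumerate lines s).map (fun q => (if q.1 < S then f q.2 else q.2) ++ "\n")
      = lines.map (· ++ "\n") := by
  induction lines generalizing s with
  | nil => simp [PySem.List.enumerate]
  | cons l rest ih =>
    rw [PySem.List.enumerate_cons, List.map_cons, List.map_cons,
      if_neg (by omega), ih (s + 1) (by omega)]

theorem mark_eq (n : Int) (l : String) (h0 : 0 ≤ n) (hl : n.toNat < l.toList.length) :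
    ((PySem.Str.slice l none (some n) ++ "x" ++ PySem.Str.slice l (some (n + 1)) none) ++ "\n").toList
      = PySem.List.pySetD l.toList n 'x' ++ ['\n'] := by
  rw [PySem.List.pySetD_of_nonneg _ _ h0, List.set_eq_take_append_cons_drop, if_pos hl]
  simp only [String.toList_append, PySem.Str.toList_slice, PySem.Chars.slice_eq_listSlice,
    PySem.List.slice_to l.toList h0, PySem.List.slice_from l.toList (by omega : (0:Int) ≤ n + 1),
    show ("x" : String).toList = ['x'] from rfl, show ("\n" : String).toList = ['\n'] from rfl,
    show (n + 1).toNat = n.toNat + 1 from by omega]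
  simp

theorem tailNever (n : Int) (rest : List String) :
    (PySem.List.enumerate rest (0 + 1)).map (fun q =>
        (if q.1 < (0 : Int) then
            PySem.Str.slice q.2 none (some n) ++ "x" ++ PySem.Str.slice q.2 (some (n + 1)) none
         else q.2) ++ "\n")
      = rest.map (· ++ "\n") :=
  enumNever rest (fun x => PySem.Str.slice x none (some n) ++ "x" ++
    PySem.Str.slice x (some (n + 1)) none) (0 + 1) 0 (by omega)

theorem tailShift (n : Int) (rest : List String) (S : Int) :
    (PySem.List.enumerate rest (0 + 1)).map (fun q =>
        (if q.1 < S then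
            PySem.Str.slice q.2 none (some n) ++ "x" ++ PySem.Str.slice q.2 (some (n + 1)) none
         else q.2) ++ "\n")
      = (PySem.List.enumerate rest 0).map (fun q =>
        (if q.1 < S - (0 + 1) then
            PySem.Str.slice q.2 none (some n) ++ "x" ++ PySem.Str.slice q.2 (some (n + 1)) none
         else q.2) ++ "\n") :=
  enumShift rest (fun x => PySem.Str.slice x none (some n) ++ "x" ++
    PySem.Str.slice x (some (n + 1)) none) (0 + 1) S

theorem BSide (n : Int) (h0 : 0 ≤ n) (lines : List String)
    (hlen : ∀ l ∈ lines, n.toNat < l.toList.length) :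
    (PySem.Str.join "" ((PySem.List.enumerate lines).map (fun q =>
        (if q.1 < ((lines.findIdx (fun l => pcol n l) : Nat) : Int) then
            PySem.Str.slice q.2 none (some n) ++ "x" ++ PySem.Str.slice q.2 (some (n + 1)) none
         else q.2) ++ "\n"))).toList = gl n lines := by
  induction lines with
  | nil => simp [PySem.List.enumerate, PySem.Str.toList_join, PySem.Chars.join,
      List.intercalate, gl]
  | cons l rest ih =>
    rw [PySem.Str.toList_join] at ih ⊢
    rw [show ("" : String).toList = [] from rfl] at ih ⊢
    rw [show PySem.List.enumerate (l :: rest) = PySem.List.enumerate (l :: rest) 0 from rfl,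
      PySem.List.enumerate_cons, List.findIdx_cons]
    by_cases h : pcol n l = true
    · rw [h]
      simp only [cond_true, Nat.cast_zero, List.map_cons]
      rw [if_neg (by omega : ¬ (0 : Int) < 0), tailNever n rest]
      rw [joinE, joinUnch]
      simp [gl, h, List.flatMap_cons]
    · simp only [Bool.not_eq_true] at h
      simp only [h, cond_false, List.map_cons]
      rw [if_pos (by push_cast; omega)]
      simp only [tailShift]
      rw [show (((rest.findIdx (fun l => pcol n l) + 1 : Nat) : Int) - (0 + 1))
          = ((rest.findIdx (fun l => pcol n l) : Nat) : Int) from by push_cast; ring]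
      rw [joinE, mark_eq n l h0 (hlen l (by simp))]
      rw [show PySem.List.enumerate rest = PySem.List.enumerate rest 0 from rfl] at ih
      rw [ih (fun l hm => hlen l (by simp [hm]))]
      simp [gl, h]

-- every line of the base model is longer than 54 characters (so every dict index is in range)
theorem hlines : ∀ l ∈ PySem.Str.splitlines baseModel, 54 < l.toList.length := by decide

theorem top (note n : Int) (h : PySem.Dict.get? noteIndexDict note = some n)
    (h0 : 0 ≤ n) (h54 : n ≤ 54) : single_note note = single_note_alt note := by
  unfold single_note single_note_alt
  rw [h]
  refine String.toList_inj.mp ?_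
  rw [foldA_false]
  rw [String.toList_append]
  rw [show (fun l => PySem.List.pyGetD l.toList n ' ' == '_') = (fun l => pcol n l) from rfl]
  rw [BSide n h0 _ (fun l hm => by have := hlines l hm; omega)]

-- ===== VERDICT (by name: the statement is the Claim_ definition above) =====
theorem single_note_spec : Claim_equal_single_note := by
  unfold Claim_equal_single_note
  intro note _ hp
  obtain ⟨h1, h2⟩ := hp
  unfold Spec_single_note
  interval_cases note
  · exact top 48 2 rfl (by norm_num) (by norm_num)
  · exact top 49 4 rfl (by norm_num) (by norm_num)
  · exact top 50 6 rfl (by norm_num) (by norm_num)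
  · exact top 51 8 rfl (by norm_num) (by norm_num)
  · exact top 52 10 rfl (by norm_num) (by norm_num)
  · exact top 53 14 rfl (by norm_num) (by norm_num)
  · exact top 54 16 rfl (by norm_num) (by norm_num)
  · exact top 55 18 rfl (by norm_num) (by norm_num)
  · exact top 56 20 rfl (by norm_num) (by norm_num)
  · exact top 57 22 rfl (by norm_num) (by norm_num)
  · exact top 58 24 rfl (by norm_num) (by norm_num)
  · exact top 59 26 rfl (by norm_num) (by norm_num)
  · exact top 60 30 rfl (by norm_num) (by norm_num)
  · exact top 61 32 rfl (by norm_num) (by norm_num)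
  · exact top 62 34 rfl (by norm_num) (by norm_num)
  · exact top 63 36 rfl (by norm_num) (by norm_num)
  · exact top 64 38 rfl (by norm_num) (by norm_num)
  · exact top 65 42 rfl (by norm_num) (by norm_num)
  · exact top 66 44 rfl (by norm_num) (by norm_num)
  · exact top 67 46 rfl (by norm_num) (by norm_num)
  · exact top 68 48 rfl (by norm_num) (by norm_num)
  · exact top 69 50 rfl (by norm_num) (by norm_num)
  · exact top 70 52 rfl (by norm_num) (by norm_num)
  · exact top 71 54 rfl (by norm_num) (by norm_num)
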